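-- pv_equiv track=rewrite | github.com/JHoo0118/coding | 2020Kakao/Bracket.py | solution
-- ===== SOURCE A (Python) =====
-- def solution(p):
--     trans = {"(": 1, ")": -1, 1: "(", -1: ")"}
--
--     def make_u_and_v(s):
--         check = trans[s[0]]
--         i = 1
--         while check != 0 and i < len(s):
--             check += trans[s[i]]
--             i += 1
--         return (s[:i], s[i:])
--
--     def is_correct(s):
--         check = 0
--         for c in s:
--             check += trans[c]
--             if check < 0:
--                 return False
--         return True
--
--     def make_correct(u, v):
--         ret = f"({recursion(v)})"
--         for c in u[1:-1]:
--             ret += trans[-trans[c]]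
--         return ret
--
--     def recursion(s):
--         if not s:
--             return s
--         u, v = make_u_and_v(s)
--         if is_correct(u):
--             return u + recursion(v)
--         return make_correct(u, v)
--
--     return recursion(p)
-- ===== SOURCE B (Python) =====
-- def solution(p):
--     flip = {"(": ")", ")": "("}
--     # one pass: partition p into maximal chunks ending where the running sum returns to 0
--     chunks = []
--     cur = []
--     s = 0
--     for c in p:
--         cur.append(c)
--         s += 1 if c == "(" else -1
--         if s == 0:
--             chunks.append("".join(cur))
--             cur = []
--     if cur:
--         chunks.append("".join(cur))
--     # right fold over the chunks with an accumulator string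
--     acc = ""
--     for ch in reversed(chunks):
--         ok = True
--         t = 0
--         for c in ch:
--             t += 1 if c == "(" else -1
--             if t < 0:
--                 ok = False
--                 break
--         if ok:
--             acc = ch + acc
--         else:
--             acc = "(" + acc + ")" + "".join(flip[c] for c in ch[1:-1])
--     return acc
-- ===== Notes on version B (the rewrite author's own statement) =====
-- stated objective: alternative
-- what changed: Replaces the mutually-recursive split/recurse functions by a single linear scan that partitions p into maximal balanced chunks once, followed by one reverse loop over the chunk list that builds the answer with an accumulator (a right fold instead of recursion).
import Mathlib
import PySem

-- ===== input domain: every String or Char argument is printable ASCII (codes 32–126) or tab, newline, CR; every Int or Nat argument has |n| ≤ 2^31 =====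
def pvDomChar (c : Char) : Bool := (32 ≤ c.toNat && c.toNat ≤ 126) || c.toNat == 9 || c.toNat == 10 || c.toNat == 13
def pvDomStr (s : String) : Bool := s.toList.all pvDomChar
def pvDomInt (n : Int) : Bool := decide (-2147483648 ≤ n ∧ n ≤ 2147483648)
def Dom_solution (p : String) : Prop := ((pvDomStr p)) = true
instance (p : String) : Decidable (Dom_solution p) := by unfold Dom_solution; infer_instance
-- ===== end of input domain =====

-- B replaces A's mutual recursion by one chunk-partitioning scan plus a reverse accumulator loop; same return value on bracket-only strings.

-- ===== PORT A =====
-- trans[c] for c ∈ {'(', ')'} (Pre_ excludes other characters, on which A raises KeyError)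
def transChar (c : Char) : Int := if c = '(' then 1 else -1

-- the while loop of make_u_and_v: returns the final i
def muvLoop (s : List Char) (check : Int) (i : Nat) : Nat :=
  if check ≠ 0 ∧ i < s.length then
    muvLoop s (check + transChar (s.getD i ' ')) (i + 1)
  else i
termination_by s.length - i
decreasing_by omega

theorem muvLoop_ge (s : List Char) (check : Int) (i : Nat) : i ≤ muvLoop s check i := by
  fun_induction muvLoop with
  | case1 check i h ih => omega
  | case2 check i h => omega

-- is_correct's loop (early-return on check < 0)
def isCorrectAux : List Char → Int → Bool
  | [], _ => true
  | c :: cs, check =>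
    let check' := check + transChar c
    if check' < 0 then false else isCorrectAux cs check'

-- trans[-trans[c]] in make_correct
def flipA (c : Char) : Char := if c = '(' then ')' else '('

def recursionA : List Char → List Char
  | [] => []
  | c :: rest =>
    let i := muvLoop (c :: rest) (transChar c) 1
    let u := (c :: rest).take i
    let v := (c :: rest).drop i
    if isCorrectAux u 0 then u ++ recursionA v
    else ('(' :: recursionA v ++ [')']) ++ ((u.drop 1).dropLast.map flipA)
termination_by s => s.length
decreasing_by
  · simp only [List.length_drop]
    have := muvLoop_ge (c :: rest) (transChar c) 1
    simp; omega
  · simp only [List.length_drop]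
    have := muvLoop_ge (c :: rest) (transChar c) 1
    simp; omega

def solution (p : String) : String := String.mk (recursionA p.toList)

-- ===== PORT B =====
-- one scan: cut a chunk each time the running sum returns to 0
def chunksB : List Char → List Char → Int → List (List Char)
  | [], cur, _ => if cur ≠ [] then [cur] else []
  | c :: rest, cur, s =>
    let cur' := cur ++ [c]
    let s' := s + (if c = '(' then 1 else -1)
    if s' = 0 then cur' :: chunksB rest [] 0 else chunksB rest cur' s'

-- the inner correctness check of B (loop with break)
def okB : List Char → Int → Bool
  | [], _ => true
  | c :: cs, t =>
    let t' := t + (if c = '(' then 1 else -1)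
    if t' < 0 then false else okB cs t'

def flipB (c : Char) : Char := if c = '(' then ')' else '('

-- one step of the reverse accumulator loop
def stepB (ch acc : List Char) : List Char :=
  if okB ch 0 then ch ++ acc
  else '(' :: acc ++ ')' :: ((ch.drop 1).dropLast.map flipB)

def solution_alt (p : String) : String :=
  String.mk (List.foldr stepB [] (chunksB p.toList [] 0))

-- ===== PRECONDITION & SPEC =====
-- A raises KeyError on any character other than '(' or ')'; Pre_ admits exactly the bracket-only strings on which A returns.
def Pre_solution (p : String) : Prop := (p.toList.all (fun c => c == '(' || c == ')')) = true
instance (p : String) : Decidable (Pre_solution p) := by unfold Pre_solution; infer_instance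
def pvWitness_solution : String := "(()))("

def Spec_solution (p : String) (out : String) : Prop := out = solution_alt p
instance (p : String) (out : String) : Decidable (Spec_solution p out) := by unfold Spec_solution; infer_instance

-- ===== CLAIM (what is proved, stated in full; the proofs are below) =====
def Claim_equal_solution : Prop := ∀ (p : String), Dom_solution p → Pre_solution p → Spec_solution p (solution p)

-- ===== LEMMAS AND PROOFS =====

-- the cut position both programs compute, as a simple recursive spec
def firstZero : List Char → Int → Nat
  | [], _ => 0
  | c :: cs, t =>
    if t + transChar c = 0 then 1 else 1 + firstZero cs (t + transChar c)

theorem firstZero_le (s : List Char) (t : Int) : firstZero s t ≤ s.length := by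
  induction s generalizing t with
  | nil => simp [firstZero]
  | cons c cs ih =>
    simp only [firstZero, List.length_cons]
    split_ifs with h
    · omega
    · have := ih (t + transChar c); omega

theorem muvLoop_eq_firstZero (s : List Char) (check : Int) (i : Nat)
    (hi : i ≤ s.length) (hc : check ≠ 0) :
    muvLoop s check i = i + firstZero (s.drop i) check := by
  fun_induction muvLoop with
  | case1 check i h ih =>
    obtain ⟨-, hlt⟩ := h
    have hdrop : s.drop i = s.getD i ' ' :: s.drop (i + 1) := by
      rw [List.getD_eq_getElem _ _ hlt]
      exact (List.drop_eq_getElem_cons hlt)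
    by_cases hz : check + transChar (s.getD i ' ') = 0
    · have h2 : muvLoop s (check + transChar (s.getD i ' ')) (i + 1) = i + 1 := by
        rw [muvLoop, if_neg (fun h => h.1 hz)]
      rw [h2, hdrop]
      simp only [firstZero, if_pos hz]
    · rw [ih (by omega) hz, hdrop]
      simp only [firstZero, if_neg hz]
      omega
  | case2 check i h =>
    have hge : ¬ i < s.length := by tauto
    have hnil : s.drop i = [] := by
      apply List.drop_eq_nil_of_le; omega
    simp [hnil, firstZero]

-- the chunking scan cuts at firstZero (invariant: sum so far ≠ 0, chunk under construction nonempty)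
theorem chunksB_split (rest : List Char) (check : Int) (cur : List Char)
    (hc : check ≠ 0) (hne : cur ≠ []) :
    chunksB rest cur check =
      (cur ++ rest.take (firstZero rest check)) ::
        chunksB (rest.drop (firstZero rest check)) [] 0 := by
  induction rest generalizing check cur with
  | nil => simp [chunksB, firstZero, hne]
  | cons c cs ih =>
    have htrans : (if c = '(' then (1 : Int) else -1) = transChar c := by
      simp [transChar]
    simp only [chunksB, htrans]
    by_cases hz : check + transChar c = 0
    · simp only [if_pos hz, firstZero]
      simp
    · simp only [if_neg hz, firstZero]
      rw [ih _ _ hz (by simp)]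
      have h1 : 1 + firstZero cs (check + transChar c) =
          firstZero cs (check + transChar c) + 1 := by omega
      simp [h1, List.take_succ_cons, List.drop_succ_cons]

theorem okB_eq_isCorrectAux (s : List Char) (t : Int) : okB s t = isCorrectAux s t := by
  induction s generalizing t with
  | nil => simp [okB, isCorrectAux]
  | cons c cs ih =>
    simp only [okB, isCorrectAux, transChar]
    split_ifs <;> simp_all

theorem recursionA_eq_fold_aux (n : Nat) :
    ∀ s : List Char, s.length ≤ n →
      recursionA s = List.foldr stepB [] (chunksB s [] 0) := by
  induction n with
  | zero =>
    intro s hs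
    have : s = [] := by
      cases s with
      | nil => rfl
      | cons c cs => simp at hs
    subst this
    simp [recursionA, chunksB]
  | succ n ih =>
    intro s hs
    match s with
    | [] => simp [recursionA, chunksB]
    | c :: rest =>
      have hc : transChar c ≠ 0 := by unfold transChar; split_ifs <;> simp
      have hmuv : muvLoop (c :: rest) (transChar c) 1 = 1 + firstZero rest (transChar c) := by
        have := muvLoop_eq_firstZero (c :: rest) (transChar c) 1 (by simp) hc
        simpa using this
      set k := firstZero rest (transChar c) with hk
      have hchunks : chunksB (c :: rest) [] 0 =
          (c :: rest.take k) :: chunksB (rest.drop k) [] 0 := by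
        have htrans : (if c = '(' then (1 : Int) else -1) = transChar c := by
          simp [transChar]
        simp only [chunksB, htrans, List.nil_append, zero_add, if_neg hc]
        rw [chunksB_split rest _ [c] hc (by simp)]
        simp [hk]
      have hu : (c :: rest).take (muvLoop (c :: rest) (transChar c) 1) = c :: rest.take k := by
        rw [hmuv]
        have : 1 + k = k + 1 := by omega
        simp [this, List.take_succ_cons]
      have hv : (c :: rest).drop (muvLoop (c :: rest) (transChar c) 1) = rest.drop k := by
        rw [hmuv]
        have : 1 + k = k + 1 := by omega
        simp [this, List.drop_succ_cons]
      have hrec : recursionA (rest.drop k) = List.foldr stepB [] (chunksB (rest.drop k) [] 0) := by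
        apply ih
        simp only [List.length_drop]
        rw [hk]
        have h1 := firstZero_le rest (transChar c)
        simp only [List.length_cons] at hs
        omega
      rw [hchunks]
      simp only [List.foldr_cons, ← hrec]
      simp only [recursionA, hu, hv, stepB, okB_eq_isCorrectAux]
      have hflip : flipA = flipB := by funext x; simp [flipA, flipB]
      split_ifs with h <;> simp [hflip]

theorem recursionA_eq_fold (s : List Char) :
    recursionA s = List.foldr stepB [] (chunksB s [] 0) :=
  recursionA_eq_fold_aux s.length s le_rfl

-- ===== VERDICT (by name: the statement is the Claim_ definition above) =====
theorem solution_spec : Claim_equal_solution := by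
  intro p _ _
  unfold Spec_solution solution solution_alt
  rw [recursionA_eq_fold]
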